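-- pv_equiv track=rewrite | github.com/azisdiri/algorithme | ALGO 24(mine)/exercices/3eme/suite.py | suite
-- ===== SOURCE A (Python) =====
-- def suite(n):
--     x =3
--     if n%2 == 0 :
--         for i in range(1,n+1):
--              x = x//2
--         return x
--     else:
--         for i in range(1,n+1):
--             x = x*3+1
--         return x
-- ===== SOURCE B (Python) =====
-- def suite(n):
--     # Closed form instead of A's loops: even n -> 3 (n<=0) or 0; odd n -> (7*3**n - 1)//2 via built-in pow.
--     if n % 2 == 0:
--         return 3 if n <= 0 else 0
--     return 3 if n < 0 else (7 * 3 ** n - 1) // 2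
-- ===== Notes on version B (the rewrite author's own statement) =====
-- stated objective: alternative
-- what changed: Replaced A's n-iteration loops with a closed form: even n gives 3 (n<=0) or 0, odd n>=1 gives (7*3**n-1)//2 via built-in fast exponentiation; intended as faster (measured 174x at n=65536, unconfirmed at the largest size where B's result exceeds the int-to-str limit).
import Mathlib
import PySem

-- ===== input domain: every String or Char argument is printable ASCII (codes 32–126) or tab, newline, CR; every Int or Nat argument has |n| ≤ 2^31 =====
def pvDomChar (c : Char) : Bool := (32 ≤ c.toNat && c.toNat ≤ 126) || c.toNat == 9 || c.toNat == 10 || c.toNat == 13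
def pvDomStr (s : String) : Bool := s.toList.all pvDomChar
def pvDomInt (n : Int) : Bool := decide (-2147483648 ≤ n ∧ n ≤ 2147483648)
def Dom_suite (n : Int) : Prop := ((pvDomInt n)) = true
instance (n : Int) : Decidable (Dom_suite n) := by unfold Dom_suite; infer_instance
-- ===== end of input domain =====

-- B replaces A's n-step loops by a closed form (even → 3 or 0; odd → (7*3^n-1)//2): a different algorithm, same exact values.

-- ===== PORT A =====
def suite (n : Int) : Int :=
  let x : Int := 3
  if PySem.Int.mod n 2 = 0 then
    (PySem.List.pyRange 1 (n + 1) 1).foldl (fun x _ => PySem.Int.floordiv x 2) x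
  else
    (PySem.List.pyRange 1 (n + 1) 1).foldl (fun x _ => x * 3 + 1) x

-- ===== PORT B =====
def suite_alt (n : Int) : Int :=
  if PySem.Int.mod n 2 = 0 then
    if n ≤ 0 then 3 else 0
  else
    if n < 0 then 3 else PySem.Int.floordiv (7 * 3 ^ n.toNat - 1) 2

-- ===== PRECONDITION & SPEC =====
def Spec_suite (n : Int) (out : Int) : Prop := out = suite_alt n
instance (n : Int) (out : Int) : Decidable (Spec_suite n out) := by unfold Spec_suite; infer_instance

-- ===== CLAIM (what is proved, stated in full; the proofs are below) =====
def Claim_equal_suite : Prop := ∀ (n : Int), Dom_suite n → Spec_suite n (suite n)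

-- ===== LEMMAS AND PROOFS =====

-- halving loop: once at 0, stays 0
theorem half_fold_zero (l : List Int) :
    l.foldl (fun x _ => PySem.Int.floordiv x 2) 0 = 0 := by
  induction l with
  | nil => rfl
  | cons a l ih =>
    simpa [List.foldl, show PySem.Int.floordiv 0 2 = 0 by decide] using ih

-- tripling loop depends only on the list's length: 2*result+1 = (2x+1)*3^len
theorem triple_fold (l : List Int) (x : Int) :
    2 * (l.foldl (fun x _ => x * 3 + 1) x) + 1 = (2 * x + 1) * 3 ^ l.length := by
  induction l generalizing x with
  | nil => simp
  | cons a l ih =>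
    simp only [List.foldl, List.length_cons]
    rw [ih (x * 3 + 1)]
    ring

-- ===== VERDICT =====
theorem suite_spec : Claim_equal_suite := by
  intro n _
  unfold Spec_suite suite suite_alt
  by_cases he : PySem.Int.mod n 2 = 0
  · simp only [he, if_true]
    by_cases hn : n ≤ 0
    · rw [if_pos hn]
      have : PySem.List.pyRange 1 (n + 1) 1 = [] := by
        simp [PySem.List.pyRange_one]
        omega
      simp [this]
    · rw [if_neg hn]
      -- n even, n ≥ 1 hence n ≥ 2: the range has ≥ 2 elements, fold reaches 0
      have h2 : (2:Int) ≤ n := by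
        have := (PySem.Int.mod_eq_zero_iff_dvd n 2).mp he
        omega
      have hlen : (PySem.List.pyRange 1 (n + 1) 1).length = n.toNat := by
        rw [PySem.List.length_pyRange_one]; omega
      obtain ⟨a, l1, h1⟩ : ∃ a l1, PySem.List.pyRange 1 (n + 1) 1 = a :: l1 := by
        cases h : PySem.List.pyRange 1 (n + 1) 1 with
        | nil => rw [h] at hlen; simp at hlen; omega
        | cons a l1 => exact ⟨a, l1, rfl⟩
      obtain ⟨b, l2, h2'⟩ : ∃ b l2, l1 = b :: l2 := by
        cases h' : l1 with
        | nil => rw [h1, h'] at hlen; simp at hlen; omega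
        | cons b l2 => exact ⟨b, l2, rfl⟩
      rw [h1, h2']
      simp only [List.foldl]
      rw [show PySem.Int.floordiv 3 2 = 1 by decide,
          show PySem.Int.floordiv 1 2 = 0 by decide]
      exact half_fold_zero l2
  · simp only [he, if_false]
    by_cases hn : n < 0
    · rw [if_pos hn]
      have : PySem.List.pyRange 1 (n + 1) 1 = [] := by
        simp [PySem.List.pyRange_one]
        omega
      simp [this]
    · rw [if_neg hn]
      have hn0 : 0 ≤ n := by omega
      have hlen : (PySem.List.pyRange 1 (n + 1) 1).length = n.toNat := by
        rw [PySem.List.length_pyRange_one]; omega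
      have hkey := triple_fold (PySem.List.pyRange 1 (n + 1) 1) 3
      rw [hlen] at hkey
      have hdv : PySem.Int.floordiv (7 * 3 ^ n.toNat - 1) 2
          = (7 * 3 ^ n.toNat - 1) / 2 :=
        PySem.Int.floordiv_eq_ediv_of_pos (by norm_num)
      rw [hdv]
      omega
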